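-- pv_equiv track=rewrite | github.com/alizahedihere/DataMining | Support_Vector_machine_On_bank_marketing.py | f_s
-- ===== SOURCE A (Python) =====
-- def f_s(choosen_f,dataset):
--     new_ds = []
--     f_name = dataset.pop(0)
--     for y in range(len(dataset)):
--         init_new_ds = []
--         for z in range(len(dataset[y][0].split(";"))):
--             if z in choosen_f:
--                 init_new_ds.append(dataset[y][0].split(";").pop(z))
--         init_new_ds.append(dataset[y][0].split(";").pop(z))
--         new_ds.append(init_new_ds)
--     return new_ds, f_name
-- ===== SOURCE B (Python) =====
-- def f_s(choosen_f, dataset):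
--     f_name = dataset.pop(0)
--     sel = sorted({i for i in choosen_f if i >= 0})
--     new_ds = []
--     for row in dataset:
--         cols = row[0].split(";")
--         picked = [cols[i] for i in sel if i < len(cols)]
--         picked.append(cols[-1])
--         new_ds.append(picked)
--     return new_ds, f_name
-- ===== Notes on version B (the rewrite author's own statement) =====
-- stated objective: idiomatic
-- what changed: B precomputes the sorted deduplicated non-negative selection once and indexes each row's columns with it directly, instead of A's scan of every column index with a membership test and a fresh split per access; B also splits each row once.
-- outside the precondition, e.g. on f_s([0], []): A raises IndexError, B raises IndexError; on f_s([0], [['a;b'], []]): A raises IndexError, B raises IndexError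
import Mathlib
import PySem

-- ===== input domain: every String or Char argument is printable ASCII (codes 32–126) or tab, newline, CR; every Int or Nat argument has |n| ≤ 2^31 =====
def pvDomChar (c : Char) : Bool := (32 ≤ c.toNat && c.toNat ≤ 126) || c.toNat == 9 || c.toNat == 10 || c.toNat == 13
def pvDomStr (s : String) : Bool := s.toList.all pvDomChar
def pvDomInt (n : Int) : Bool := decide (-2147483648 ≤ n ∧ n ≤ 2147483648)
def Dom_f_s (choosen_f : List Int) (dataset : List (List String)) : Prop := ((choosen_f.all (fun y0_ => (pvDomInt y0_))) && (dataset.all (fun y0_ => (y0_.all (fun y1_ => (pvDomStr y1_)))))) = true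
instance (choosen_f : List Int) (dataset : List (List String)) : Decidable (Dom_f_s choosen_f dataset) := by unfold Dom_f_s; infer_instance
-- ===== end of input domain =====

-- B iterates the sorted deduplicated selection (computed once) instead of scanning every
-- column index and testing membership; equivalence is about the return value — both A and B
-- pop dataset[0] in place, so the mutation is identical.

-- ===== PORT A =====
-- row[0].split(";") — ";" is a non-empty literal, so split? always returns some
def pySplitSemi (s : String) : List String :=
  match PySem.Str.split? s ";" with
  | some cs => cs
  | none => []  -- unreachable: ";" is not the empty separator

-- inner loop of A over the columns of one row: scan all indices, pick those in choosen_f,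
-- then append the popped last column (Python's leftover loop variable z = len-1)
def fsPickA (choosen_f : List Int) (cols : List String) : List String :=
  let init := (PySem.List.pyRange 0 (cols.length : Int) 1).foldl
      (fun acc z =>
        if z ∈ choosen_f then
          match PySem.List.pop? cols z with
          | some p => acc ++ [p.1]
          | none => acc
        else acc) []
  match PySem.List.pop? cols ((cols.length : Int) - 1) with
  | some p => init ++ [p.1]
  | none => init

def fsRowA (choosen_f : List Int) (row : List String) : List String :=
  fsPickA choosen_f (pySplitSemi (PySem.List.pyGetD row 0 ""))

def f_s (choosen_f : List Int) (dataset : List (List String)) : List (List String) × List String :=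
  match dataset with
  | [] => ([], [])  -- unreachable under Pre_ (Python: dataset.pop(0) raises IndexError)
  | f_name :: rest => (rest.map (fun row => fsRowA choosen_f row), f_name)

-- ===== PORT B =====
-- one row of B: index directly with the pre-sorted selection, then append the last column
def fsPickB (sel : List Int) (cols : List String) : List String :=
  ((sel.filter (fun i => i < (cols.length : Int))).map (fun i => PySem.List.pyGetD cols i ""))
    ++ [PySem.List.pyGetD cols (-1) ""]

def fsRowB (sel : List Int) (row : List String) : List String :=
  fsPickB sel (pySplitSemi (PySem.List.pyGetD row 0 ""))

def f_s_alt (choosen_f : List Int) (dataset : List (List String)) : List (List String) × List String :=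
  match dataset with
  | [] => ([], [])  -- unreachable under Pre_
  | f_name :: rest =>
    let sel := PySem.List.sorted (PySem.Set.ofList (choosen_f.filter (fun i => 0 ≤ i))) (fun x => x) false
    (rest.map (fun row => fsRowB sel row), f_name)

-- ===== PRECONDITION & SPEC =====
-- Pre_ excludes exactly the inputs on which A raises: dataset = [] (dataset.pop(0) → IndexError)
-- and data rows that are the empty list (dataset[y][0] → IndexError).
def Pre_f_s (choosen_f : List Int) (dataset : List (List String)) : Prop :=
  dataset ≠ [] ∧ ∀ row ∈ dataset.tail, row ≠ []
instance (choosen_f : List Int) (dataset : List (List String)) : Decidable (Pre_f_s choosen_f dataset) := by unfold Pre_f_s; infer_instance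

def pvWitness_f_s : List Int × List (List String) :=
  ([0, 2, 2, -1], [["age;job;y"], ["1;admin;no"], ["2;tech;yes"]])

def Spec_f_s (choosen_f : List Int) (dataset : List (List String)) (out : List (List String) × List String) : Prop := out = f_s_alt choosen_f dataset
instance (choosen_f : List Int) (dataset : List (List String)) (out : List (List String) × List String) : Decidable (Spec_f_s choosen_f dataset out) := by unfold Spec_f_s; infer_instance

-- ===== CLAIM (what is proved, stated in full; the proofs are below) =====
def Claim_equal_f_s : Prop := ∀ (choosen_f : List Int) (dataset : List (List String)), Dom_f_s choosen_f dataset → Pre_f_s choosen_f dataset → Spec_f_s choosen_f dataset (f_s choosen_f dataset)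

-- ===== LEMMAS AND PROOFS =====

-- two strictly increasing integer lists with the same members are equal
theorem eq_of_pairwise_lt_of_mem_iff :
    ∀ (l1 l2 : List Int), l1.Pairwise (· < ·) → l2.Pairwise (· < ·) →
      (∀ x, x ∈ l1 ↔ x ∈ l2) → l1 = l2 := by
  intro l1
  induction l1 with
  | nil =>
    intro l2 _ _ hm
    cases l2 with
    | nil => rfl
    | cons b t2 => exact absurd ((hm b).2 (List.mem_cons_self)) (by simp)
  | cons a t1 ih =>
    intro l2 h1 h2 hm
    cases l2 with
    | nil => exact absurd ((hm a).1 (List.mem_cons_self)) (by simp)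
    | cons b t2 =>
      have hab : a = b := by
        have ha : a ∈ b :: t2 := (hm a).1 List.mem_cons_self
        have hb : b ∈ a :: t1 := (hm b).2 List.mem_cons_self
        rcases List.mem_cons.1 ha with h | h
        · exact h
        · rcases List.mem_cons.1 hb with h' | h'
          · exact h'.symm
          · have := (List.pairwise_cons.1 h2).1 a h
            have := (List.pairwise_cons.1 h1).1 b h'
            omega
      subst hab
      have htail : ∀ x, x ∈ t1 ↔ x ∈ t2 := by
        intro x
        constructor
        · intro hx
          have hlt := (List.pairwise_cons.1 h1).1 x hx
          have : x ∈ a :: t2 := (hm x).1 (List.mem_cons_of_mem _ hx)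
          rcases List.mem_cons.1 this with h | h
          · omega
          · exact h
        · intro hx
          have hlt := (List.pairwise_cons.1 h2).1 x hx
          have : x ∈ a :: t1 := (hm x).2 (List.mem_cons_of_mem _ hx)
          rcases List.mem_cons.1 this with h | h
          · omega
          · exact h
      exact congrArg (a :: ·) (ih t2 (List.pairwise_cons.1 h1).2 (List.pairwise_cons.1 h2).2 htail)

-- A's inner loop collects cols[z] for the in-range indices z ∈ choosen_f, in increasing order
theorem foldl_pick (cf : List Int) (cols : List String) (acc : List String) :
    ∀ (l : List Nat), (∀ k ∈ l, k < cols.length) →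
      (l.map (fun k : Nat => (k : Int))).foldl
        (fun acc z =>
          if z ∈ cf then
            match PySem.List.pop? cols z with
            | some p => acc ++ [p.1]
            | none => acc
          else acc) acc
      = acc ++ ((l.filter (fun k : Nat => decide ((k : Int) ∈ cf))).map (fun k => cols.getD k "")) := by
  intro l
  induction l generalizing acc with
  | nil => simp
  | cons k t ih =>
    intro hb
    have hk : k < cols.length := hb k List.mem_cons_self
    have hpop : PySem.List.pop? cols ((k : Nat) : Int) = some (cols[k], cols.eraseIdx k) :=
      PySem.List.pop?_natCast cols k hk
    by_cases hmem : (k : Int) ∈ cf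
    · simp only [List.map_cons, List.foldl_cons, hpop, if_pos hmem]
      rw [ih _ (fun x hx => hb x (List.mem_cons_of_mem _ hx))]
      simp [hmem, List.getD_eq_getElem?_getD, hk]
    · simp only [List.map_cons, List.foldl_cons, if_neg hmem]
      rw [ih _ (fun x hx => hb x (List.mem_cons_of_mem _ hx))]
      simp [hmem]

-- B's selection, cut to the in-range indices, is exactly A's increasing scan of indices
theorem sel_filter_eq (cf : List Int) (n : Nat) :
    (PySem.List.sorted (PySem.Set.ofList (cf.filter (fun i => 0 ≤ i))) (fun x => x) false).filter
        (fun i => i < (n : Int))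
      = ((List.range n).filter (fun k : Nat => decide ((k : Int) ∈ cf))).map (fun k : Nat => (k : Int)) := by
  apply eq_of_pairwise_lt_of_mem_iff
  · exact List.Pairwise.filter _ (PySem.List.sorted_ofList_pairwise_lt _)
  · refine List.pairwise_map.2 ?_
    refine List.Pairwise.imp ?_
      (List.Pairwise.filter (fun k : Nat => decide ((k : Int) ∈ cf)) (List.pairwise_lt_range (n := n)))
    intro a b h
    exact_mod_cast h
  · intro x
    simp only [List.mem_filter, PySem.List.mem_sorted, PySem.Set.mem_ofList, List.mem_map,
      List.mem_range, decide_eq_true_eq]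
    constructor
    · rintro ⟨⟨hx, h0⟩, hn⟩
      refine ⟨x.toNat, ⟨by omega, by simpa [Int.toNat_of_nonneg h0] using hx⟩, by simp [Int.toNat_of_nonneg h0]⟩
    · rintro ⟨k, ⟨hk, hmem⟩, rfl⟩
      exact ⟨⟨hmem, by positivity⟩, by exact_mod_cast hk⟩

-- Python's s.split(sep) never returns the empty list
theorem splitOn_go_ne_nil (sep : List Char) : ∀ (fuel : Nat) (l cur : List Char) (acc : List (List Char)),
    PySem.Chars.splitOn.go sep fuel l cur acc ≠ [] := by
  intro fuel
  induction fuel with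
  | zero => intro l cur acc; simp [PySem.Chars.splitOn.go]
  | succ m ih =>
    intro l cur acc
    cases l with
    | nil => simp [PySem.Chars.splitOn.go]
    | cons c rest =>
      rw [PySem.Chars.splitOn.go]
      split
      · exact ih _ _ _
      · exact ih _ _ _

-- the split of a Python string on ";" is never the empty list
theorem splitOn_ne_nil (s : String) : pySplitSemi s ≠ [] := by
  unfold pySplitSemi
  have h : PySem.Str.split? s ";" = some ((PySem.Chars.splitOn s.toList [';']).map String.ofList) := by
    simp [PySem.Str.split?, PySem.Chars.split?]
  rw [h]
  simp [PySem.Chars.splitOn]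
  exact splitOn_go_ne_nil _ _ _ _ _

theorem pick_eq (cf : List Int) (cols : List String) (hne : cols ≠ []) :
    fsPickA cf cols
      = fsPickB (PySem.List.sorted (PySem.Set.ofList (cf.filter (fun i => 0 ≤ i))) (fun x => x) false) cols := by
  have hlen : 0 < cols.length := List.length_pos_iff.2 hne
  have hlast : PySem.List.pop? cols ((cols.length : Int) - 1)
      = some (cols[cols.length - 1], cols.eraseIdx (cols.length - 1)) := by
    have h : ((cols.length : Int) - 1) = ((cols.length - 1 : Nat) : Int) := by omega
    rw [h]
    exact PySem.List.pop?_natCast cols _ (by omega)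
  have hlastB : PySem.List.pyGetD cols (-1) "" = cols[cols.length - 1] := by
    rw [PySem.List.pyGetD_neg_one cols "" hne, List.getLast_eq_getElem]
  have hrange : PySem.List.pyRange 0 (cols.length : Int) 1
      = (List.range cols.length).map (fun k : Nat => (k : Int)) := by
    rw [PySem.List.pyRange_one]
    simp
  simp only [fsPickA, fsPickB, hlast, hrange, hlastB]
  rw [foldl_pick cf cols [] (List.range cols.length) (by intro k hk; simpa using hk)]
  rw [sel_filter_eq cf cols.length]
  simp [List.map_map, Function.comp, PySem.List.pyGetD_natCast]

theorem row_eq (cf : List Int) (row : List String) :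
    fsRowA cf row
      = fsRowB (PySem.List.sorted (PySem.Set.ofList (cf.filter (fun i => 0 ≤ i))) (fun x => x) false) row := by
  unfold fsRowA fsRowB
  exact pick_eq cf _ (splitOn_ne_nil _)

-- ===== VERDICT (by name: the statement is the Claim_ definition above) =====
theorem f_s_spec : Claim_equal_f_s := by
  intro cf ds _ hpre
  unfold Spec_f_s
  cases ds with
  | nil => exact absurd rfl hpre.1
  | cons f rest =>
    unfold f_s f_s_alt
    simp only [Prod.mk.injEq, and_true]
    exact List.map_congr_left (fun row _ => row_eq cf row)
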